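-- pv_equiv track=rewrite | github.com/danrneal/uncommon-word-tabulator | uncommonwords.py | count_uncommon_words
-- ===== SOURCE A (Python) =====
-- def count_uncommon_words(common_words, text):
--     uncommon_words = {}
--     for word in text:
--         if word not in common_words and word not in uncommon_words:
--             uncommon_words[word] = 1
--         elif word not in common_words:
--             uncommon_words[word] += 1
--     return uncommon_words
-- ===== SOURCE B (Python) =====
-- def count_uncommon_words(common_words, text):
--     # Dedupe to the distinct words (first-occurrence order), then count each
--     # uncommon one by a direct scan of text - no running counter at all.
--     return {w: text.count(w) for w in dict.fromkeys(text) if w not in common_words}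
-- ===== Notes on version B (the rewrite author's own statement) =====
-- stated objective: idiomatic
-- what changed: B keeps no running counter at all: it first dedupes text into its distinct words via dict.fromkeys (first-occurrence order), then for each distinct uncommon word computes its multiplicity with a direct text.count scan, in a single dict comprehension.
import Mathlib
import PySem

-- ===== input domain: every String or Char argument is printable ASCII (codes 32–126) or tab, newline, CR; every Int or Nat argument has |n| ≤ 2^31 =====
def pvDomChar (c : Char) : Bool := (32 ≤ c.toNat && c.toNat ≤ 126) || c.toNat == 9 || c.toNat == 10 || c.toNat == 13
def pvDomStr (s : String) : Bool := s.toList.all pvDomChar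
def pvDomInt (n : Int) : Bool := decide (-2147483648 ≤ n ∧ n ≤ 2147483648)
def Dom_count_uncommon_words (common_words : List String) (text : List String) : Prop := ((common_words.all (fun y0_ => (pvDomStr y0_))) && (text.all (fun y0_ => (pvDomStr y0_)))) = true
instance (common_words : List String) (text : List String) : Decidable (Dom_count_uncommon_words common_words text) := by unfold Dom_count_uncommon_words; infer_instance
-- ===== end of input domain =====

-- B keeps no running counter: it dedupes text (dict.fromkeys, first-occurrence order) and
-- counts each distinct uncommon word by a direct text.count scan; same return value as A.

-- ===== PORT A =====
def count_uncommon_words (common_words : List String) (text : List String) : List (String × Int) :=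
  (text.foldl (fun uncommon_words word =>
      if ¬ common_words.contains word ∧ ¬ uncommon_words.contains word then
        uncommon_words.insert word 1
      else if ¬ common_words.contains word then
        -- uncommon_words[word] += 1 : the key is present here, so modify with default 0 is exact
        uncommon_words.modify word 0 (· + 1)
      else uncommon_words)
    PySem.Dict.empty).items

-- ===== PORT B =====
def count_uncommon_words_alt (common_words : List String) (text : List String) : List (String × Int) :=
  -- {w: text.count(w) for w in dict.fromkeys(text) if w not in common_words}
  ((PySem.List.dedup text).filter (fun w => !common_words.contains w)).map
    (fun w => (w, (PySem.List.count text w : Int)))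

-- ===== PRECONDITION & SPEC =====
def Spec_count_uncommon_words (common_words : List String) (text : List String) (out : List (String × Int)) : Prop := out = count_uncommon_words_alt common_words text
instance (common_words : List String) (text : List String) (out : List (String × Int)) : Decidable (Spec_count_uncommon_words common_words text out) := by unfold Spec_count_uncommon_words; infer_instance

-- ===== CLAIM =====
def Claim_equal_count_uncommon_words : Prop := ∀ (common_words : List String) (text : List String), Dom_count_uncommon_words common_words text → Spec_count_uncommon_words common_words text (count_uncommon_words common_words text)

-- ===== LEMMAS AND PROOFS =====

-- set(filter q xs) = filter q (set(xs))
theorem set_ofList_filter {α : Type} [BEq α] [LawfulBEq α] (q : α → Bool) (xs : List α) :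
    PySem.Set.ofList (xs.filter q) = (PySem.Set.ofList xs).filter q := by
  induction xs using List.reverseRecOn with
  | nil => rfl
  | append_singleton ys x ih =>
    rw [List.filter_append, PySem.Set.ofList_append_singleton]
    by_cases hq : q x = true
    · have hfx : List.filter q [x] = [x] := by simp [hq]
      rw [hfx, PySem.Set.ofList_append_singleton, ih]
      by_cases hx : x ∈ PySem.Set.ofList ys
      · have hx' : x ∈ (PySem.Set.ofList ys).filter q := List.mem_filter.mpr ⟨hx, hq⟩
        rw [PySem.Set.add_of_mem hx', PySem.Set.add_of_mem hx]
      · have hx' : x ∉ (PySem.Set.ofList ys).filter q := fun h => hx (List.mem_filter.mp h).1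
        rw [PySem.Set.add_of_not_mem hx', PySem.Set.add_of_not_mem hx, List.filter_append]
        simp [hq]
    · have hfx : List.filter q [x] = [] := by simp [hq]
      rw [hfx, List.append_nil, ih]
      by_cases hx : x ∈ PySem.Set.ofList ys
      · rw [PySem.Set.add_of_mem hx]
      · rw [PySem.Set.add_of_not_mem hx, List.filter_append]
        simp [hq]

-- A's loop body, with the two uncommon branches fused into one modify
theorem stepA_eq (common_words : List String) (d : PySem.Dict String Int) (w : String) :
    (if ¬ common_words.contains w ∧ ¬ d.contains w then d.insert w 1
     else if ¬ common_words.contains w then d.modify w 0 (· + 1) else d)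
    = (if !common_words.contains w then d.modify w 0 (· + 1) else d) := by
  by_cases hc : common_words.contains w = true
  · have hc' : w ∈ common_words := by simpa using hc
    simp [hc']
  · have hc' : w ∉ common_words := by simpa using hc
    by_cases hd : d.contains w = true
    · simp [hc', hd]
    · have hd' : d.contains w = false := by simp [hd]
      simp only [hc, hd, and_self, Bool.not_false]
      have hm : d.modify w 0 (· + 1) = d.insert w (d.getD w 0 + 1) := rfl
      rw [if_pos (by simpa using hc), hm, PySem.Dict.getD_of_not_contains d 0 hd']
      norm_num

-- A's result: the counter of the uncommon words of text, as items
theorem portA_eq (common_words : List String) (text : List String) :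
    count_uncommon_words common_words text
    = ((PySem.Set.ofList (text.filter (fun w => !common_words.contains w))).map
        (fun k => (k, ((text.filter (fun w => !common_words.contains w)).count k : Int)))) := by
  unfold count_uncommon_words
  have h1 : (text.foldl (fun d word =>
      if ¬ common_words.contains word ∧ ¬ d.contains word then d.insert word 1
      else if ¬ common_words.contains word then d.modify word 0 (· + 1) else d)
      (PySem.Dict.empty : PySem.Dict String Int))
      = (text.foldl (fun d word => if !common_words.contains word then d.modify word 0 (· + 1) else d)
        (PySem.Dict.empty : PySem.Dict String Int)) := by
    apply PySem.List.foldl_congr_mem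
    intro d w _
    exact stepA_eq common_words d w
  rw [h1, PySem.List.foldl_if_eq_foldl_filter, ← PySem.Dict.counter_eq_foldl,
    PySem.Dict.items_counter]

-- ===== VERDICT =====
theorem count_uncommon_words_spec : Claim_equal_count_uncommon_words := by
  intro common_words text _
  unfold Spec_count_uncommon_words count_uncommon_words_alt
  rw [portA_eq, set_ofList_filter, PySem.List.dedup_eq_ofList]
  apply List.map_congr_left
  intro k hk
  have hq : (!common_words.contains k) = true := (List.mem_filter.mp hk).2
  rw [PySem.List.count_eq]
  congr 1
  rw [List.count_filter (p := fun w => !common_words.contains w) (a := k) (l := text) hq]
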